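-- pv_equiv track=rewrite | github.com/jessfraz/dotfiles | .vscode/extensions/ms-python.python-2020.6.89148/pythonFiles/lib/python/debugpy/_vendored/pydevd/_pydev_bundle/pydev_monkey.py | get_c_option_index
-- ===== SOURCE A (Python) =====
-- def _get_str_type_compatible(s, args):
--     '''
--     This method converts `args` to byte/unicode based on the `s' type.
--     '''
--     if isinstance(args, (list, tuple)):
--         ret = []
--         for arg in args:
--             if type(s) == type(arg):
--                 ret.append(arg)
--             else:
--                 if isinstance(s, bytes):
--                     ret.append(arg.encode('utf-8'))
--                 else:
--                     ret.append(arg.decode('utf-8'))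
--         return ret
--     else:
--         if type(s) == type(args):
--             return args
--         else:
--             if isinstance(s, bytes):
--                 return args.encode('utf-8')
--             else:
--                 return args.decode('utf-8')
--
-- def get_c_option_index(args):
--     """
--     Get index of "-c" argument and check if it's interpreter's option
--     :param args: list of arguments
--     :return: index of "-c" if it's an interpreter's option and -1 if it doesn't exist or program's option
--     """
--     for ind_c, arg in enumerate(args):
--         if arg == _get_str_type_compatible(arg, '-c'):
--             break
--     else:
--         return -1
--
--     for i in range(1, ind_c):
--         if not args[i].startswith(_get_str_type_compatible(args[i], '-')):
--             # there is an arg without "-" before "-c", so it's not an interpreter's option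
--             return -1
--     return ind_c
-- ===== SOURCE B (Python) =====
-- def _get_str_type_compatible(s, args):
--     '''
--     This method converts `args` to byte/unicode based on the `s' type.
--     '''
--     if isinstance(args, (list, tuple)):
--         ret = []
--         for arg in args:
--             if type(s) == type(arg):
--                 ret.append(arg)
--             else:
--                 if isinstance(s, bytes):
--                     ret.append(arg.encode('utf-8'))
--                 else:
--                     ret.append(arg.decode('utf-8'))
--         return ret
--     else:
--         if type(s) == type(args):
--             return args
--         else:
--             if isinstance(s, bytes):
--                 return args.encode('utf-8')
--             else:
--                 return args.decode('utf-8')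
--
--
-- def get_c_option_index(args):
--     """
--     Get index of "-c" argument and check if it's interpreter's option
--     :param args: list of arguments
--     :return: index of "-c" if it's an interpreter's option and -1 if it doesn't exist or program's option
--     """
--     # single pass: validate dash-prefixes inline while searching for "-c"
--     for i, arg in enumerate(args):
--         if arg == _get_str_type_compatible(arg, '-c'):
--             return i
--         if i >= 1 and not arg.startswith(_get_str_type_compatible(arg, '-')):
--             return -1
--     return -1
-- ===== Notes on version B (the rewrite author's own statement) =====
-- stated objective: simpler
-- what changed: A's two sequential scans (locate '-c', then re-scan indices 1..ind_c for a non-dash arg) are collapsed into one enumerate pass that validates dash prefixes inline and early-returns; the single pass also halves the _get_str_type_compatible/indexing work per element.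
import Mathlib
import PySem

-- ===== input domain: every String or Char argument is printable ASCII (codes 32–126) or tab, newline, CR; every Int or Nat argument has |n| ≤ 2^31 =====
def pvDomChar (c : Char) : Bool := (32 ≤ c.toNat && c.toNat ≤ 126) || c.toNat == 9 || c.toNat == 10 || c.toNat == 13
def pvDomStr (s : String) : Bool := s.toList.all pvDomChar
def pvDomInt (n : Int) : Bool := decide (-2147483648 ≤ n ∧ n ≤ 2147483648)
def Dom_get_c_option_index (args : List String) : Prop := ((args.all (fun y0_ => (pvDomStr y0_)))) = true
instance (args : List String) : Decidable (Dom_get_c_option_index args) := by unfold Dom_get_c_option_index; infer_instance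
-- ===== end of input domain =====

-- B collapses A's two sequential scans into one enumerate pass with inline dash-prefix
-- validation (objective: simpler). On List String inputs _get_str_type_compatible is the
-- identity, so both ports compare against the literals "-c" and "-".

-- ===== PORT A =====
-- first loop: 'for ind_c, arg in enumerate(args): if arg == "-c": break / else: return -1'
def pyA_findC : Nat → List String → Option Nat
  | _, [] => none
  | i, a :: rest => if a = "-c" then some i else pyA_findC (i + 1) rest

-- second loop: 'for i in range(1, ind_c): if not args[i].startswith("-"): return -1'
-- args[i] is ported as pyGetD: every i in range(1, ind_c) is a valid index, so this is exact.
def pyA_check (args : List String) (ind_c : Int) : List Int → Int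
  | [] => ind_c
  | i :: rest =>
      if ¬ PySem.Str.startswith (PySem.List.pyGetD args i "") "-" then -1
      else pyA_check args ind_c rest

def get_c_option_index (args : List String) : Int :=
  match pyA_findC 0 args with
  | none => -1
  | some ind_c => pyA_check args (ind_c : Int) (PySem.List.pyRange 1 (ind_c : Int) 1)

-- ===== PORT B =====
-- single pass: return i at the first "-c"; return -1 at the first non-dash arg with index ≥ 1
def altGo : Nat → List String → Int
  | _, [] => -1
  | i, a :: rest =>
      if a = "-c" then (i : Int)
      else if 1 ≤ i ∧ ¬ PySem.Str.startswith a "-" then -1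
      else altGo (i + 1) rest

def get_c_option_index_alt (args : List String) : Int := altGo 0 args

-- ===== PRECONDITION & SPEC =====
def Spec_get_c_option_index (args : List String) (out : Int) : Prop := out = get_c_option_index_alt args
instance (args : List String) (out : Int) : Decidable (Spec_get_c_option_index args out) := by unfold Spec_get_c_option_index; infer_instance

-- ===== CLAIM (what is proved, stated in full; the proofs are below) =====
def Claim_equal_get_c_option_index : Prop := ∀ (args : List String), Dom_get_c_option_index args → Spec_get_c_option_index args (get_c_option_index args)

-- ===== LEMMAS AND PROOFS =====

theorem pyA_findC_ge {j : Nat} : ∀ {i : Nat} {l : List String}, pyA_findC i l = some j → i ≤ j := by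
  intro i l
  induction l generalizing i with
  | nil => intro h; simp [pyA_findC] at h
  | cons a rest ih =>
      intro h
      simp only [pyA_findC] at h
      split at h
      · exact Nat.le_of_eq (Option.some.inj h)
      · exact Nat.le_trans (Nat.le_succ i) (ih h)

theorem key (rest : List String) : ∀ (pre : List String), 1 ≤ pre.length →
    altGo pre.length rest =
      (match pyA_findC pre.length rest with
       | none => -1
       | some ind => pyA_check (pre ++ rest) (ind : Int)
           (PySem.List.pyRange (pre.length : Int) (ind : Int) 1)) := by
  induction rest with
  | nil => intro pre _; simp [altGo, pyA_findC]
  | cons b rest' ih =>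
      intro pre hpre
      have hget : PySem.List.pyGetD (pre ++ b :: rest') ((pre.length : Nat) : Int) "" = b := by
        simp [PySem.List.pyGetD_natCast]
      by_cases hb : b = "-c"
      · subst hb
        simp [altGo, pyA_findC, pyA_check,
          PySem.List.pyRange_one_eq_nil (le_refl (pre.length : Int))]
      · have hA : pyA_findC pre.length (b :: rest') = pyA_findC (pre.length + 1) rest' := by
          simp only [pyA_findC]; rw [if_neg hb]
        by_cases hdash : PySem.Str.startswith b "-" = true
        · -- b starts with '-': both sides continue
          have step : altGo pre.length (b :: rest') = altGo (pre.length + 1) rest' := by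
            simp only [altGo]
            rw [if_neg hb, if_neg (fun hcon => hcon.2 hdash)]
          have ihh := ih (pre ++ [b]) (by simp)
          have hlen : (pre ++ [b]).length = pre.length + 1 := by simp
          rw [hlen, List.append_assoc] at ihh
          simp only [List.singleton_append] at ihh
          rw [step, ihh, hA]
          cases hfc : pyA_findC (pre.length + 1) rest' with
          | none => rfl
          | some ind =>
              have hge : pre.length + 1 ≤ ind := pyA_findC_ge hfc
              have hlt : (pre.length : Int) < (ind : Int) := by exact_mod_cast Nat.lt_of_lt_of_le (Nat.lt_succ_self _) hge
              show pyA_check (pre ++ b :: rest') (ind : Int) (PySem.List.pyRange ((pre.length : Int) + 1) (ind : Int) 1) =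
                   pyA_check (pre ++ b :: rest') (ind : Int) (PySem.List.pyRange (pre.length : Int) (ind : Int) 1)
              rw [PySem.List.pyRange_one_cons hlt]
              simp only [pyA_check, hget, hdash, not_true_eq_false]
              · norm_num
        · -- b does not start with '-': B returns -1, A's check hits index pre.length
          have stepB : altGo pre.length (b :: rest') = -1 := by
            simp only [altGo]
            rw [if_neg hb, if_pos ⟨hpre, hdash⟩]
          rw [stepB, hA]
          cases hfc : pyA_findC (pre.length + 1) rest' with
          | none => rfl
          | some ind =>
              have hge : pre.length + 1 ≤ ind := pyA_findC_ge hfc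
              have hlt : (pre.length : Int) < (ind : Int) := by exact_mod_cast Nat.lt_of_lt_of_le (Nat.lt_succ_self _) hge
              show (-1 : Int) = pyA_check (pre ++ b :: rest') (ind : Int) (PySem.List.pyRange (pre.length : Int) (ind : Int) 1)
              rw [PySem.List.pyRange_one_cons hlt]
              have hdash' : PySem.Chars.startswith b.toList ['-'] = false := by
                simpa using hdash
              simp [pyA_check, hget, hdash']

-- ===== VERDICT (by name: the statement is the Claim_ definition above) =====
theorem get_c_option_index_spec : Claim_equal_get_c_option_index := by
  intro args _
  unfold Spec_get_c_option_index get_c_option_index get_c_option_index_alt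
  cases args with
  | nil => simp [pyA_findC, altGo]
  | cons a rest =>
      by_cases ha : a = "-c"
      · subst ha
        simp [pyA_findC, altGo, pyA_check,
          PySem.List.pyRange_one_eq_nil (by norm_num : (0 : Int) ≤ 1)]
      · have h0 : altGo 0 (a :: rest) = altGo 1 rest := by
          simp only [altGo]
          rw [if_neg ha, if_neg (fun hcon => absurd hcon.1 (by norm_num))]
        have hA : pyA_findC 0 (a :: rest) = pyA_findC 1 rest := by
          simp only [pyA_findC]; rw [if_neg ha]
        have hk := key rest [a] (by simp)
        simp only [List.length_cons, List.length_nil, List.singleton_append] at hk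
        rw [← hA, ← h0] at hk
        simpa using hk.symm
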